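-- pv_equiv track=rewrite | github.com/NEU-1/python-study | 소수의 연속합.py | hap
-- ===== SOURCE A (Python) =====
-- def hap(prime, z, num, count):
--     cut = 0
--     for i in range(z, -1, -1):
--         cut += prime[i]
--         if cut == num:
--             count += 1
--             return count
--         elif cut > num:
--             return count
-- ===== SOURCE B (Python) =====
-- def hap(prime, z, num, count):
--     # Prefix-sum reformulation: sum(prime[i..z]) = total - prefix[i], so A's
--     # first downward running sum >= num is the LAST index i in [0, z] whose
--     # prefix sum is <= total - num.
--     prefixes = [0]
--     for x in prime[:z + 1]:
--         prefixes.append(prefixes[-1] + x)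
--     t = prefixes[-1] - num
--     best = None
--     for i in range(z + 1):
--         if prefixes[i] <= t:
--             best = i
--     if best is not None:
--         return count + 1 if prefixes[best] == t else count
-- ===== Notes on version B (the rewrite author's own statement) =====
-- stated objective: alternative
-- what changed: B replaces A's downward suffix-sum scan with early exit by a forward prefix-sum pass: since sum(prime[i..z]) = total - prefix[i], A's answer index is the last i in [0,z] with prefix[i] <= total - num, which B selects in a second forward pass and then compares once.
-- outside the precondition, e.g. on hap([2, 3], 1, 9, 0): A returns None, B returns None; on hap([2, 3], -1, 5, 0): A returns None, B returns None
import Mathlib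
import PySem

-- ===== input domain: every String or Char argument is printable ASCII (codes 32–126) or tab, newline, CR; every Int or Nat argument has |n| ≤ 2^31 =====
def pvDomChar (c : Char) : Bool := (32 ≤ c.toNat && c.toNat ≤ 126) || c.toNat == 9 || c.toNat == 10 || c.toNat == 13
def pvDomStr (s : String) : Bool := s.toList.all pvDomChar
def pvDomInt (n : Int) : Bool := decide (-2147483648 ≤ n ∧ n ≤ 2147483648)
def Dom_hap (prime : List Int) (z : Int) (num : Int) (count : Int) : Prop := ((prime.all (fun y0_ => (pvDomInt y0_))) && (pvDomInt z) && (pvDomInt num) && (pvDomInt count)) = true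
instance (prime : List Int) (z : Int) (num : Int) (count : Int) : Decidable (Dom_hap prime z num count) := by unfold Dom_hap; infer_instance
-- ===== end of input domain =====

-- B replaces A's downward suffix-sum scan (with early exit) by a forward
-- prefix-sum pass: sum(prime[i..z]) = total - prefix[i], so A's answer index is
-- the LAST i in [0,z] with prefix[i] <= total - num; same cost, different
-- algorithm. Equivalence is claimed on Pre_hap (where the Python A returns an int).

-- ===== PORT A =====
-- the for-loop of A: indices come from range(z, -1, -1); returns 0 where Python
-- leaves the function without a return value (fall-through None) or raises
-- IndexError at prime[i] — both excluded by Pre_hap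
def hapLoop (prime : List Int) (num : Int) (cut : Int) (count : Int) : List Int → Int
  | [] => 0
  | i :: rest =>
    match PySem.List.pyGet? prime i with
    | none => 0
    | some p =>
      let cut2 := cut + p
      if cut2 = num then count + 1
      else if cut2 > num then count
      else hapLoop prime num cut2 count rest

def hap (prime : List Int) (z : Int) (num : Int) (count : Int) : Int :=
  hapLoop prime num 0 count (PySem.List.pyRange z (-1) (-1))

-- ===== PORT B =====
-- prefixes = [0]; for x in window: prefixes.append(prefixes[-1] + x)
def buildPrefixes : List Int → Int → List Int
  | [], s => [s]
  | x :: rest, s => s :: buildPrefixes rest (s + x)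

-- Source B returns None (fall-through) when no index qualifies — outside Pre_hap;
-- the port returns 0 there (and pyGetD's default is never read inside Pre_hap)
def hap_alt (prime : List Int) (z : Int) (num : Int) (count : Int) : Int :=
  let window := PySem.List.slice prime none (some (z + 1))
  let prefixes := buildPrefixes window 0
  let t := PySem.List.pyGetD prefixes (-1) 0 - num
  let best := (PySem.List.pyRange 0 (z + 1) 1).foldl
    (fun b i => if PySem.List.pyGetD prefixes i 0 ≤ t then some i else b) (none : Option Int)
  match best with
  | none => 0
  | some i => if PySem.List.pyGetD prefixes i 0 = t then count + 1 else count

-- ===== PRECONDITION & SPEC =====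
-- Pre_hap = exactly the inputs where the Python A returns an int: 0 ≤ z (else the
-- loop body never runs and A returns None), z < len(prime) (else IndexError), and
-- some downward running sum prime[k]+…+prime[z] reaches num (else A falls through
-- returning None, which is not an int).
def Pre_hap (prime : List Int) (z : Int) (num : Int) (count : Int) : Prop :=
  0 ≤ z ∧ z < prime.length ∧
    ∃ k ∈ List.range (z.toNat + 1), num ≤ ((prime.take (z.toNat + 1)).drop k).sum
instance (prime : List Int) (z : Int) (num : Int) (count : Int) : Decidable (Pre_hap prime z num count) := by unfold Pre_hap; infer_instance

def pvWitness_hap : List Int × Int × Int × Int := ([2, 3], 1, 5, 0)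

def Spec_hap (prime : List Int) (z : Int) (num : Int) (count : Int) (out : Int) : Prop := out = hap_alt prime z num count
instance (prime : List Int) (z : Int) (num : Int) (count : Int) (out : Int) : Decidable (Spec_hap prime z num count out) := by unfold Spec_hap; infer_instance

-- ===== CLAIM (what is proved, stated in full; the proofs are below) =====
def Claim_equal_hap : Prop := ∀ (prime : List Int) (z : Int) (num : Int) (count : Int), Dom_hap prime z num count → Pre_hap prime z num count → Spec_hap prime z num count (hap prime z num count)

-- ===== LEMMAS AND PROOFS =====

-- the common epilogue both ports reduce to: the selected index j (if any)
-- decides count+1 vs count by comparing its prefix sum with t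
def pick (count t : Int) (P : Nat → Int) : Option Nat → Int
  | none => 0
  | some j => if P j = t then count + 1 else count

lemma find?_map_congr {α β : Type} (f : α → β) (p : β → Bool) (q : α → Bool) :
    ∀ (l : List α), (∀ a ∈ l, p (f a) = q a) →
      (l.map f).find? p = (l.find? q).map f := by
  intro l
  induction l with
  | nil => intro _; rfl
  | cons x xs ih =>
    intro h
    have hx := h x (List.mem_cons_self)
    simp only [List.map_cons, List.find?_cons, hx]
    cases q x
    · exact ih (fun a ha => h a (List.mem_cons_of_mem x ha))
    · rfl

-- B's second loop, a keep-last fold, is find? on the reversed list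
lemma foldl_keepLast {α : Type} (P : α → Prop) [DecidablePred P] :
    ∀ (l : List α) (b : Option α),
      l.foldl (fun acc x => if P x then some x else acc) b =
        (l.reverse.find? (fun x => decide (P x))).or b := by
  intro l
  induction l with
  | nil => intro b; rfl
  | cons x xs ih =>
    intro b
    simp only [List.foldl_cons, List.reverse_cons]
    rw [ih]
    cases h : xs.reverse.find? (fun x => decide (P x)) with
    | none => by_cases hp : P x <;> simp [List.find?_append, h, hp]
    | some y => simp [List.find?_append, h]

lemma buildPrefixes_getD (xs : List Int) :
    ∀ (s : Int) (j : Nat), j ≤ xs.length →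
      (buildPrefixes xs s).getD j 0 = s + (xs.take j).sum := by
  induction xs with
  | nil =>
    intro s j hj
    have hj0 : j = 0 := by simpa using hj
    subst hj0; simp [buildPrefixes]
  | cons x r ih =>
    intro s j hj
    cases j with
    | zero => simp [buildPrefixes]
    | succ j' =>
      simp only [buildPrefixes, List.getD_cons_succ, List.take_succ_cons, List.sum_cons]
      rw [ih (s + x) j' (by simpa using hj)]
      ring

lemma buildPrefixes_ne_nil (xs : List Int) (s : Int) : buildPrefixes xs s ≠ [] := by
  cases xs <;> simp [buildPrefixes]

lemma buildPrefixes_getLast (xs : List Int) :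
    ∀ s (h : buildPrefixes xs s ≠ []), (buildPrefixes xs s).getLast h = s + xs.sum := by
  induction xs with
  | nil => intro s h; simp [buildPrefixes]
  | cons x r ih =>
    intro s h
    simp only [buildPrefixes] at h ⊢
    rw [List.getLast_cons (buildPrefixes_ne_nil r (s + x)), ih (s + x)]
    simp [add_assoc]

-- A's fused downward loop computes pick of the first qualifying downward index,
-- i.e. find? on the reversed range of prefix indices
lemma hapA_loop (prime : List Int) (num count : Int) (n : Nat) (hn : n ≤ prime.length) :
    ∀ m : Nat, m ≤ n →
      hapLoop prime num ((prime.take n).sum - (prime.take m).sum) count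
          (PySem.List.pyRange ((m : Int) - 1) (-1) (-1)) =
        pick count ((prime.take n).sum - num) (fun j => (prime.take j).sum)
          ((List.range m).reverse.find?
            (fun j => decide ((prime.take j).sum ≤ (prime.take n).sum - num))) := by
  intro m
  induction m with
  | zero =>
    intro _
    rw [PySem.List.pyRange_neg_one_eq_nil (by norm_num)]
    simp [hapLoop, pick]
  | succ m' ih =>
    intro hm
    have hm' : m' < prime.length := by omega
    have hget : PySem.List.pyGet? prime ((m' : Nat) : Int) = some (prime[m']'hm') := by
      rw [PySem.List.pyGet?_natCast, List.getElem?_eq_getElem hm']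
    rw [show ((m' + 1 : Nat) : Int) - 1 = (m' : Int) by push_cast; ring,
      PySem.List.pyRange_neg_one_cons (by omega)]
    simp only [hapLoop, hget]
    have hsum : (prime.take n).sum - (prime.take (m' + 1)).sum + prime[m'] =
        (prime.take n).sum - (prime.take m').sum := by
      rw [List.sum_take_succ prime m' hm']; ring
    rw [hsum, List.range_succ, List.reverse_append]
    simp only [List.reverse_cons, List.reverse_nil, List.nil_append, List.cons_append,
      List.find?_cons]
    by_cases hle : (prime.take m').sum ≤ (prime.take n).sum - num
    · by_cases heq : (prime.take m').sum = (prime.take n).sum - num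
      · rw [if_pos (by omega)]
        simp [heq, pick]
      · rw [if_neg (by omega), if_pos (by omega)]
        simp only [hle, decide_true]
        simp [pick, heq]
    · rw [if_neg (by omega), if_neg (by omega)]
      simp only [hle, decide_false]
      exact ih (by omega)

-- ===== VERDICT (by name: the statement is the Claim_ definition above) =====
theorem hap_spec : Claim_equal_hap := by
  intro prime z num count _ hpre
  obtain ⟨hz, hlt, -⟩ := hpre
  unfold Spec_hap
  have hn : z.toNat + 1 ≤ prime.length := by omega
  -- abbreviations
  generalize hN : z.toNat + 1 = n at hn
  have hzn : z = ((n : Int)) - 1 := by omega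
  have hwlen : (prime.take n).length = n := by simp; omega
  -- A side reduces to pick ∘ find? over the reversed index range
  have hA : hap prime z num count =
      pick count ((prime.take n).sum - num) (fun j => (prime.take j).sum)
        ((List.range n).reverse.find?
          (fun j => decide ((prime.take j).sum ≤ (prime.take n).sum - num))) := by
    have h := hapA_loop prime num count n hn n (le_refl n)
    rw [sub_self] at h
    simp only [hap, hzn]
    exact h
  -- B side ingredients
  have hw : PySem.List.slice prime none (some (z + 1)) = prime.take n := by
    rw [show z + 1 = ((n : Nat) : Int) by omega, PySem.List.slice_to_natCast]
  have ht : PySem.List.pyGetD (buildPrefixes (prime.take n) 0) (-1) 0 - num =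
      (prime.take n).sum - num := by
    rw [PySem.List.pyGetD_neg_one _ _ (buildPrefixes_ne_nil (prime.take n) 0),
      buildPrefixes_getLast]
    ring
  have hrange : PySem.List.pyRange 0 (z + 1) 1 = (List.range n).map (fun k => Int.ofNat k) := by
    rw [PySem.List.pyRange_one, show z + 1 - 0 = ((n : Nat) : Int) by omega,
      Int.toNat_natCast]
    exact List.map_congr_left (fun k _ => by simp [Int.ofNat_eq_natCast])
  have hgetD : ∀ j : Nat, j < n →
      PySem.List.pyGetD (buildPrefixes (prime.take n) 0) ((j : Nat) : Int) 0 =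
        (prime.take j).sum := by
    intro j hj
    rw [PySem.List.pyGetD_natCast, buildPrefixes_getD (prime.take n) 0 j (by omega), List.take_take]
    rw [show min j n = j by omega]
    ring
  have hB : hap_alt prime z num count =
      pick count ((prime.take n).sum - num) (fun j => (prime.take j).sum)
        ((List.range n).reverse.find?
          (fun j => decide ((prime.take j).sum ≤ (prime.take n).sum - num))) := by
    simp only [hap_alt, hw, ht, hrange]
    rw [foldl_keepLast, ← List.map_reverse, Option.or_none,
      find?_map_congr (fun k : Nat => Int.ofNat k)
        (fun i => decide (PySem.List.pyGetD (buildPrefixes (prime.take n) 0) i 0 ≤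
          (prime.take n).sum - num))
        (fun j => decide ((prime.take j).sum ≤ (prime.take n).sum - num))
        (List.range n).reverse
        (by intro a ha; simp only [Int.ofNat_eq_natCast, hgetD a (by simpa using ha)])]
    cases hfind : (List.range n).reverse.find?
        (fun j => decide ((prime.take j).sum ≤ (prime.take n).sum - num)) with
    | none => simp [pick]
    | some j =>
      have hj : j < n := by
        have := List.mem_of_find?_eq_some hfind
        simpa using this
      simp only [Option.map_some, pick, Int.ofNat_eq_natCast]
      simp only [hgetD j hj]
  rw [hA, hB]
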